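-- pv_equiv track=rewrite | github.com/JRCSTU/fuefit | fuefit/pdcalc.py | gen_all_prefix_pairs
-- ===== SOURCE A (Python) =====
-- import itertools as it
--
-- def gen_all_prefix_pairs(path):
--     ''' R.foo.com' --> [('R.foo.com', 'R.foo'), ('R.foo', 'R')] but outer reversed'''
--     (it1, it2) = it.tee(path.split('.'))
--     s1 = ''
--     s2 = next(it2)
--     try:
--         while(True):
--             s1 += next(it1)
--             s2 += '.' + next(it2)
--             yield (s2, s1)
--             s1 += '.'
--     except StopIteration:
--         pass
-- ===== SOURCE B (Python) =====
-- def gen_all_prefix_pairs(path):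
--     ''' R.foo.com' --> [('R.foo.com', 'R.foo'), ('R.foo', 'R')] but outer reversed'''
--     parts = path.split('.')
--     for i in range(1, len(parts)):
--         yield ('.'.join(parts[:i + 1]), '.'.join(parts[:i]))
-- ===== Notes on version B (the rewrite author's own statement) =====
-- stated objective: simpler
-- what changed: Replaces the tee'd-iterator pair with running string accumulators and StopIteration control flow by a single split into a list and an index loop that recomputes each prefix by rejoining a slice of the parts.
import Mathlib
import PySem

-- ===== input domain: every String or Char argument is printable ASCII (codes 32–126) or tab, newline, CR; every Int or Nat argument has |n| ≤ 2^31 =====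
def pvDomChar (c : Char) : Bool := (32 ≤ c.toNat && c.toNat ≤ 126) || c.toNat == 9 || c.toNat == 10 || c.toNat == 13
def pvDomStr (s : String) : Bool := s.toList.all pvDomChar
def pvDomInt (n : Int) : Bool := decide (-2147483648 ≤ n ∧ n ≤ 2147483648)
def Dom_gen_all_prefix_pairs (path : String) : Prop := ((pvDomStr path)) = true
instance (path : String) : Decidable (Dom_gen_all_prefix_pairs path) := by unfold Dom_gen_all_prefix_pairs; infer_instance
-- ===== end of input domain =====

-- B replaces A's tee'd-iterator + running-accumulator + StopIteration machinery by an
-- index loop that recomputes each prefix with '.'.join over a slice (objective: simpler).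


-- ===== PORT A =====
-- the while-True loop: it1/it2 are the two tee'd iterators, s1/s2 the accumulators;
-- StopIteration (either iterator exhausted) ends the loop
def pvLoopA (it1 it2 : List String) (s1 s2 : String) : List (String × String) :=
  match it1, it2 with
  | x1 :: r1, x2 :: r2 =>
      let s1' := s1 ++ x1
      let s2' := s2 ++ "." ++ x2
      (s2', s1') :: pvLoopA r1 r2 (s1' ++ ".") s2'
  | _, _ => []

def gen_all_prefix_pairs (path : String) : List (String × String) :=
  match (PySem.Str.split? path ".").getD [] with   -- path.split('.'); sep ≠ "" so split? is some
  | [] => []  -- unreachable: str.split never returns an empty list, so 's2 = next(it2)' always succeeds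
  | p0 :: rest => pvLoopA (p0 :: rest) rest "" p0

-- ===== PORT B =====
def gen_all_prefix_pairs_alt (path : String) : List (String × String) :=
  let parts := (PySem.Str.split? path ".").getD []   -- path.split('.')
  (PySem.List.pyRange 1 (parts.length : Int) 1).map (fun i =>
    (PySem.Str.join "." (PySem.List.slice parts none (some (i + 1))),
     PySem.Str.join "." (PySem.List.slice parts none (some i))))

-- ===== PRECONDITION & SPEC =====
def Spec_gen_all_prefix_pairs (path : String) (out : List (String × String)) : Prop := out = gen_all_prefix_pairs_alt path
instance (path : String) (out : List (String × String)) : Decidable (Spec_gen_all_prefix_pairs path out) := by unfold Spec_gen_all_prefix_pairs; infer_instance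

-- ===== CLAIM (what is proved, stated in full; the proofs are below) =====
def Claim_equal_gen_all_prefix_pairs : Prop := ∀ (path : String), Dom_gen_all_prefix_pairs path → Spec_gen_all_prefix_pairs path (gen_all_prefix_pairs path)

-- ===== LEMMAS AND PROOFS =====

-- "join pre ++ '.'" with the empty-prefix special case folded in
def pvDots (pre : List String) : String :=
  if pre = [] then "" else PySem.Str.join "." pre ++ "."

lemma pv_chars_join_snoc (pre : List (List Char)) (x : List Char) :
    PySem.Chars.join ['.'] (pre ++ [x]) =
      (if pre = [] then ([] : List Char) else PySem.Chars.join ['.'] pre ++ ['.']) ++ x := by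
  induction pre with
  | nil => simp [PySem.Chars.join_singleton]
  | cons a t ih =>
      cases t with
      | nil =>
          simp [PySem.Chars.join_cons_cons, PySem.Chars.join_singleton]
      | cons b r =>
          rw [show ((a :: b :: r) ++ [x] : List (List Char)) = a :: b :: (r ++ [x]) from rfl,
              PySem.Chars.join_cons_cons,
              show (b :: (r ++ [x]) : List (List Char)) = (b :: r) ++ [x] from rfl, ih,
              if_neg (by simp : ¬ (b :: r : List (List Char)) = []),
              if_neg (by simp : ¬ (a :: b :: r : List (List Char)) = []),
              PySem.Chars.join_cons_cons]
          simp [List.append_assoc]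

lemma pv_join_snoc (pre : List String) (x : String) :
    PySem.Str.join "." (pre ++ [x]) = pvDots pre ++ x := by
  have hdot : ("." : String).toList = ['.'] := by decide
  rw [← String.toList_inj]
  unfold pvDots
  by_cases h : pre = []
  · subst h
    simp [PySem.Str.toList_join, PySem.Chars.join_singleton, hdot]
  · rw [if_neg h]
    simp only [String.toList_append, PySem.Str.toList_join, hdot, List.map_append, List.map_cons,
      List.map_nil]
    rw [pv_chars_join_snoc]
    rw [if_neg (by simp [h])]

lemma pv_take_mid (pre : List String) (x : String) (l : List String) (m : Nat) :
    (pre ++ x :: l).take (pre.length + 1 + m) = pre ++ x :: l.take m := by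
  rw [List.take_append]
  have h1 : pre.length + 1 + m - pre.length = m + 1 := by omega
  have h2 : (pre.take (pre.length + 1 + m)) = pre := List.take_of_length_le (by omega)
  rw [h1, h2, List.take_succ_cons]

lemma pv_loopA_eq (it2 : List String) : ∀ (pre : List String) (x : String) (s1 s2 : String),
    s1 = pvDots pre → s2 = PySem.Str.join "." (pre ++ [x]) →
    pvLoopA (x :: it2) it2 s1 s2 =
      (List.range it2.length).map (fun k =>
        (PySem.Str.join "." ((pre ++ x :: it2).take (pre.length + 2 + k)),
         PySem.Str.join "." ((pre ++ x :: it2).take (pre.length + 1 + k)))) := by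
  induction it2 with
  | nil => intro pre x s1 s2 _ _; simp [pvLoopA]
  | cons y r ih =>
      intro pre x s1 s2 hs1 hs2
      rw [pvLoopA]
      have hx : s1 ++ x = PySem.Str.join "." (pre ++ [x]) := by
        rw [hs1, ← pv_join_snoc]
      have hy : s2 ++ "." ++ y = PySem.Str.join "." ((pre ++ [x]) ++ [y]) := by
        rw [hs2, pv_join_snoc (pre ++ [x]) y]
        simp [pvDots]
      have hdots : s1 ++ x ++ "." = pvDots (pre ++ [x]) := by
        rw [hx]; simp [pvDots]
      have hstep := ih (pre ++ [x]) y (s1 ++ x ++ ".") (s2 ++ "." ++ y) hdots hy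
      rw [hstep, hx, hy]
      simp only [List.length_cons, List.range_succ_eq_map, List.map_cons, List.map_map]
      congr 1
      · -- head (k = 0)
        have e2 : pre.length + 2 + 0 = pre.length + 1 + 1 := by omega
        have e1 : pre.length + 1 + 0 = pre.length + 1 + 0 := rfl
        rw [e2, pv_take_mid pre x (y :: r) 1, pv_take_mid pre x (y :: r) 0]
        simp
      · -- tail: reindex k ↦ k + 1
        apply List.map_congr_left
        intro k _
        simp only [Function.comp_apply, List.length_append, List.length_cons, List.length_nil,
          List.append_assoc, List.cons_append, List.nil_append,
          Nat.succ_eq_add_one]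
        have e1 : pre.length + 1 + 2 + k = pre.length + 2 + (k + 1) := by omega
        have e2 : pre.length + 1 + 1 + k = pre.length + 1 + (k + 1) := by omega
        rw [e1, e2]

lemma pv_alt_map_eq (p0 : String) (rest : List String) :
    (PySem.List.pyRange 1 (((p0 :: rest).length : Nat) : Int) 1).map (fun i =>
      (PySem.Str.join "." (PySem.List.slice (p0 :: rest) none (some (i + 1))),
       PySem.Str.join "." (PySem.List.slice (p0 :: rest) none (some i)))) =
    (List.range rest.length).map (fun k =>
      (PySem.Str.join "." ((([] : List String) ++ p0 :: rest).take (([] : List String).length + 2 + k)),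
       PySem.Str.join "." ((([] : List String) ++ p0 :: rest).take (([] : List String).length + 1 + k)))) := by
  rw [PySem.List.pyRange_one]
  have hlen : ((((p0 :: rest).length : Nat) : Int) - 1).toNat = rest.length := by
    simp
  rw [hlen, List.map_map]
  apply List.map_congr_left
  intro k _
  simp only [Function.comp_apply, List.nil_append, List.length_nil]
  have h1 : (1 : Int) + (k : Int) + 1 = ((k + 2 : Nat) : Int) := by push_cast; ring
  have h2 : (1 : Int) + (k : Int) = ((k + 1 : Nat) : Int) := by push_cast; ring
  rw [h1, h2, PySem.List.slice_to_natCast, PySem.List.slice_to_natCast]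
  have e1 : 0 + 2 + k = k + 2 := by omega
  have e2 : 0 + 1 + k = k + 1 := by omega
  rw [e1, e2]

-- ===== VERDICT (by name: the statement is the Claim_ definition above) =====
theorem gen_all_prefix_pairs_spec : Claim_equal_gen_all_prefix_pairs := by
  intro path _
  unfold Spec_gen_all_prefix_pairs
  cases hsplit : (PySem.Str.split? path ".").getD [] with
  | nil =>
      simp [gen_all_prefix_pairs, gen_all_prefix_pairs_alt, hsplit,
        PySem.List.pyRange_one_eq_nil]
  | cons p0 rest =>
      simp only [gen_all_prefix_pairs, gen_all_prefix_pairs_alt, hsplit]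
      have hs1 : ("" : String) = pvDots [] := by simp [pvDots]
      have hs2 : p0 = PySem.Str.join "." ([] ++ [p0]) := by
        rw [← String.toList_inj]
        simp [PySem.Str.toList_join, PySem.Chars.join_singleton]
      rw [pv_loopA_eq rest [] p0 "" p0 hs1 hs2, pv_alt_map_eq p0 rest]
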